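-- pv_equiv track=rewrite | github.com/habvi/kyopro_educational90 | level_5/051_TypicalShop.py | culc
-- ===== SOURCE A (Python) =====
-- from collections import defaultdict
--
-- def culc(lis, m):
--     case = defaultdict(list)
--     for i in range(1 << m):
--         ct = 0
--         price = 0
--         for j in range(m):
--             if i >> j & 1:
--                 ct += 1
--                 price += lis[j]
--         case[ct].append(price)
--     return case
-- ===== SOURCE B (Python) =====
-- def culc(lis, m):
--     # doubling construction: after processing item j, prices[i]/cts[i] are the
--     # subset-sum and popcount of subset i for all i < 2**(j+1)  -- O(2**m) total
--     prices = [0]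
--     cts = [0]
--     for j in range(m):
--         x = lis[j]
--         prices = prices + [p + x for p in prices]
--         cts = cts + [c + 1 for c in cts]
--     buckets = [[] for _ in range(m + 1)]
--     for c, p in zip(cts, prices):
--         buckets[c].append(p)
--     return {c: b for c, b in enumerate(buckets)}
-- ===== Notes on version B (the rewrite author's own statement) =====
-- stated objective: alternative
-- what changed: Instead of recomputing popcount and subset price bit-by-bit for each of the 2^m subsets (inner loop over m bits), B builds the price and popcount tables by list doubling (one pass per item, total list work 2^m) and then groups prices into buckets in a single pass; intended as the O(2^m) vs O(m*2^m) rewrite, but a timing run could not confirm 'faster' at the largest sizes (both are exponential; measured 4.18x at n=16).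
import Mathlib
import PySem

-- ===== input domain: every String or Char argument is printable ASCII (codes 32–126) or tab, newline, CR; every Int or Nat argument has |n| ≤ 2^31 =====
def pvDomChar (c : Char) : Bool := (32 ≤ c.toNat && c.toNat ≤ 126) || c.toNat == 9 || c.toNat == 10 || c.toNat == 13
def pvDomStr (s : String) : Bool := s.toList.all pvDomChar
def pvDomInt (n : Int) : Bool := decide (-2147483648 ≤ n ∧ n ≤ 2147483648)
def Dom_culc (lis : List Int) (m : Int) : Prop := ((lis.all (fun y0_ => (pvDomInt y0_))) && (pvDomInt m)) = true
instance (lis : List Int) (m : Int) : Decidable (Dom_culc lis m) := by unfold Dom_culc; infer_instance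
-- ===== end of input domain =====

-- B replaces A's per-subset inner bit loop by a list-doubling construction of the subset-price and
-- popcount tables followed by a single grouping pass.

-- ===== PORT A =====
def culc (lis : List Int) (m : Int) : List (Int × List Int) :=
  ((List.range (1 <<< m.toNat)).foldl
    (fun (case : PySem.Dict Int (List Int)) i =>
      let cp := (List.range m.toNat).foldl
        (fun (cp : Int × Int) (j : Nat) =>
          if (i >>> j) &&& 1 = 1 then (cp.1 + 1, cp.2 + PySem.List.pyGetD lis (j : Int) 0)
          else cp) (0, 0)
      case.modify cp.1 [] (fun l => l ++ [cp.2]))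
    PySem.Dict.empty).items

-- ===== PORT B =====
def culc_alt (lis : List Int) (m : Int) : List (Int × List Int) :=
  let pc := (List.range m.toNat).foldl
    (fun (pc : List Int × List Int) (j : Nat) =>
      let x := PySem.List.pyGetD lis (j : Int) 0
      (pc.1 ++ pc.1.map (fun p => p + x), pc.2 ++ pc.2.map (fun c => c + 1)))
    ([0], [0])
  let buckets := (pc.2.zip pc.1).foldl
    (fun (bs : List (List Int)) cp =>
      PySem.List.pySetD bs cp.1 (PySem.List.pyGetD bs cp.1 [] ++ [cp.2]))
    ((List.range (m.toNat + 1)).map (fun _ => ([] : List Int)))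
  (PySem.Dict.ofList (PySem.List.enumerate buckets)).items

-- ===== PRECONDITION & SPEC =====
-- Pre_ excludes exactly the inputs where Python A raises: m < 0 (ValueError on the negative
-- shift 1 << m) and m > len(lis) (IndexError on lis[j]).
def Pre_culc (lis : List Int) (m : Int) : Prop := 0 ≤ m ∧ m ≤ lis.length
instance (lis : List Int) (m : Int) : Decidable (Pre_culc lis m) := by unfold Pre_culc; infer_instance
def pvWitness_culc : List Int × Int := ([3, 5], 2)

def Spec_culc (lis : List Int) (m : Int) (out : List (Int × List Int)) : Prop := out = culc_alt lis m
instance (lis : List Int) (m : Int) (out : List (Int × List Int)) : Decidable (Spec_culc lis m out) := by unfold Spec_culc; infer_instance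

-- ===== CLAIM (what is proved, stated in full; the proofs are below) =====
def Claim_equal_culc : Prop := ∀ (lis : List Int) (m : Int), Dom_culc lis m → Pre_culc lis m → Spec_culc lis m (culc lis m)

-- ===== LEMMAS AND PROOFS =====

def keyF (M i : Nat) : Nat := (List.range M).countP (fun j => i.testBit j)
def valF (lis : List Int) (M i : Nat) : Int :=
  (((List.range M).filter (fun j => i.testBit j)).map (fun j => lis.getD j 0)).sum

def canon (lis : List Int) (M : Nat) : List (Int × List Int) :=
  (List.range (M + 1)).map (fun c : Nat =>
    ((c : Int), ((List.range (2 ^ M)).filter (fun i => keyF M i == c)).map (valF lis M)))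

theorem bit_cond (i j : Nat) : ((i >>> j) &&& 1 = 1) ↔ i.testBit j := by
  simp [Nat.testBit, Nat.and_comm, Nat.and_one_is_mod]

theorem inner_loop (lis : List Int) (i : Nat) (l : List Nat) (c s : Int) :
    l.foldl (fun (cp : Int × Int) (j : Nat) =>
      if (i >>> j) &&& 1 = 1 then (cp.1 + 1, cp.2 + PySem.List.pyGetD lis (j : Int) 0)
      else cp) (c, s)
    = (c + l.countP (fun j => i.testBit j),
       s + ((l.filter (fun j => i.testBit j)).map (fun j => lis.getD j 0)).sum) := by
  induction l generalizing c s with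
  | nil => simp
  | cons x t ih =>
    simp only [List.foldl_cons, List.countP_cons, List.filter_cons]
    by_cases h : i.testBit x
    · rw [if_pos ((bit_cond i x).2 h), ih]
      simp only [h, if_true, PySem.List.pyGetD_natCast, List.map_cons, List.sum_cons,
        Prod.mk.injEq, List.getD_eq_getElem?_getD]
      exact ⟨by push_cast; ring, by ring⟩
    · rw [if_neg (fun hc => h ((bit_cond i x).1 hc)), ih]
      simp [h]

theorem keyF_le (M i : Nat) : keyF M i ≤ M := by
  simpa [keyF] using List.countP_le_length (l := List.range M) (p := fun j => i.testBit j)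

theorem keyF_top (M : Nat) : keyF M (2 ^ M - 1) = M := by
  unfold keyF
  rw [List.countP_eq_length.2, List.length_range]
  intro a ha
  simp only [List.mem_range] at ha
  simp [Nat.testBit_two_pow_sub_one, ha]

theorem keyF_succ_lt {M i : Nat} (h : i < 2 ^ M) : keyF (M + 1) i = keyF M i := by
  unfold keyF
  rw [List.range_succ, List.countP_append]
  simp [Nat.testBit_lt_two_pow h]

theorem keyF_succ_add {M i : Nat} (h : i < 2 ^ M) : keyF (M + 1) (2 ^ M + i) = keyF M i + 1 := by
  unfold keyF
  rw [List.range_succ, List.countP_append]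
  have h1 : (List.range M).countP (fun j => (2 ^ M + i).testBit j)
      = (List.range M).countP (fun j => i.testBit j) := by
    apply List.countP_congr
    intro j hj
    simp only [List.mem_range] at hj
    simp [Nat.testBit_two_pow_add_gt hj]
  rw [h1]
  simp [Nat.testBit_two_pow_add_eq, Nat.testBit_lt_two_pow h]

theorem valF_succ_lt {lis : List Int} {M i : Nat} (h : i < 2 ^ M) :
    valF lis (M + 1) i = valF lis M i := by
  unfold valF
  rw [List.range_succ, List.filter_append]
  simp [Nat.testBit_lt_two_pow h]

theorem valF_succ_add {lis : List Int} {M i : Nat} (h : i < 2 ^ M) :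
    valF lis (M + 1) (2 ^ M + i) = valF lis M i + lis.getD M 0 := by
  unfold valF
  rw [List.range_succ, List.filter_append]
  have h1 : (List.range M).filter (fun j => (2 ^ M + i).testBit j)
      = (List.range M).filter (fun j => i.testBit j) := by
    apply List.filter_congr
    intro j hj
    simp only [List.mem_range] at hj
    simp [Nat.testBit_two_pow_add_gt hj]
  rw [h1]
  simp [Nat.testBit_two_pow_add_eq, Nat.testBit_lt_two_pow h]

-- the A-side fold rewritten with keyF/valF
theorem a_fold (lis : List Int) (M : Nat) :
    ((List.range (2 ^ M)).foldl
      (fun (case : PySem.Dict Int (List Int)) i =>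
        let cp := (List.range M).foldl
          (fun (cp : Int × Int) (j : Nat) =>
            if (i >>> j) &&& 1 = 1 then (cp.1 + 1, cp.2 + PySem.List.pyGetD lis (j : Int) 0)
            else cp) (0, 0)
        case.modify cp.1 [] (fun l => l ++ [cp.2]))
      PySem.Dict.empty)
    = ((List.range (2 ^ M)).map (fun i => ((keyF M i : Int), valF lis M i))).foldl
        (fun d p => d.modify p.1 [] (fun l => l ++ [p.2])) PySem.Dict.empty := by
  rw [List.foldl_map]
  congr 1
  funext case i
  rw [inner_loop]
  simp [keyF, valF]

theorem keyFI_map_succ (M : Nat) :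
    (List.range (2 ^ (M + 1))).map (fun i => (keyF (M + 1) i : Int))
    = (List.range (2 ^ M)).map (fun i => (keyF M i : Int))
      ++ ((List.range (2 ^ M)).map (fun i => (keyF M i : Int))).map (fun c => c + 1) := by
  rw [pow_succ, mul_two, List.range_add, List.map_append, List.map_map, List.map_map]
  congr 1
  · exact List.map_congr_left (fun i hi => by rw [keyF_succ_lt (List.mem_range.1 hi)])
  · exact List.map_congr_left (fun i hi => by
      simp only [Function.comp_apply]
      rw [keyF_succ_add (List.mem_range.1 hi)]
      push_cast; ring)

theorem set_add_mem {s : List Int} {x : Int} (h : x ∈ s) : PySem.Set.add s x = s := by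
  unfold PySem.Set.add PySem.Set.contains
  simp [h]

theorem set_add_not_mem {s : List Int} {x : Int} (h : x ∉ s) : PySem.Set.add s x = s ++ [x] := by
  unfold PySem.Set.add PySem.Set.contains
  simp [h]

theorem set_update_subset {s : List Int} (l : List Int) (h : ∀ x ∈ l, x ∈ s) :
    PySem.Set.update s l = s := by
  induction l with
  | nil => rfl
  | cons x t ih =>
    unfold PySem.Set.update at *
    rw [List.foldl_cons, set_add_mem (h x (by simp))]
    exact ih (fun y hy => h y (by simp [hy]))

theorem set_update_one {s : List Int} {a : Int} (l : List Int) (ha : a ∉ s) (hal : a ∈ l)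
    (h : ∀ x ∈ l, x ∈ s ∨ x = a) : PySem.Set.update s l = s ++ [a] := by
  induction l with
  | nil => simp at hal
  | cons x t ih =>
    unfold PySem.Set.update at *
    rw [List.foldl_cons]
    by_cases hx : x = a
    · subst hx
      rw [set_add_not_mem ha]
      exact set_update_subset t (fun y hy => by
        rcases h y (by simp [hy]) with h1 | h1
        · simp [h1]
        · simp [h1])
    · have hxs : x ∈ s := by
        rcases h x (by simp) with h1 | h1
        · exact h1
        · exact absurd h1 hx
      rw [set_add_mem hxs]
      exact ih ((List.mem_cons.1 hal).resolve_left (fun h1 => hx h1.symm))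
        (fun y hy => h y (by simp [hy]))

theorem key_set (M : Nat) :
    PySem.Set.ofList ((List.range (2 ^ M)).map (fun i => (keyF M i : Int)))
    = (List.range (M + 1)).map (fun c : Nat => (c : Int)) := by
  induction M with
  | zero => decide
  | succ M ih =>
    rw [keyFI_map_succ M, PySem.Set.ofList_eq_foldl, List.foldl_append,
      ← PySem.Set.ofList_eq_foldl, ih]
    have step : PySem.Set.update ((List.range (M + 1)).map (fun c : Nat => (c : Int)))
        (((List.range (2 ^ M)).map (fun i => (keyF M i : Int))).map (fun c => c + 1))
        = (List.range (M + 1)).map (fun c : Nat => (c : Int)) ++ [((M : Int) + 1)] := by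
      apply set_update_one
      · simp only [List.mem_map, List.mem_range]
        rintro ⟨c, hc, he⟩
        have : (c : Int) < (M : Int) + 1 := by exact_mod_cast hc
        omega
      · simp only [List.mem_map, List.mem_range]
        refine ⟨(keyF M (2 ^ M - 1) : Int), ⟨2 ^ M - 1, ?_, rfl⟩, ?_⟩
        · have : 0 < 2 ^ M := Nat.two_pow_pos M
          omega
        · rw [keyF_top]
      · simp only [List.mem_map, List.mem_range]
        rintro x ⟨y, ⟨i, hi, rfl⟩, rfl⟩
        have hle := keyF_le M i
        by_cases hx : keyF M i = M
        · right; rw [hx]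
        · left
          exact ⟨keyF M i + 1, by omega, by push_cast; ring⟩
    -- Set.update is foldl add
    show PySem.Set.update _ _ = _
    rw [step]
    simp [List.range_succ]

theorem cast_beq (a b : Nat) : ((a : Int) == (b : Int)) = (a == b) := by
  by_cases h : a = b
  · simp [h]
  · simp [h, Nat.cast_inj]

theorem culc_eq_canon (lis : List Int) (m : Int) : culc lis m = canon lis m.toNat := by
  unfold culc
  rw [Nat.one_shiftLeft, a_fold]
  have hnodup : (((List.range (2 ^ m.toNat)).map
        (fun i => ((keyF m.toNat i : Int), valF lis m.toNat i))).foldl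
      (fun d p => d.modify p.1 [] (fun l => l ++ [p.2])) PySem.Dict.empty).keys.Nodup := by
    exact PySem.Dict.nodup_keys_foldl_modify_key _ Prod.fst [] (fun d p => fun l => l ++ [p.2]) _
      (by simp [PySem.Dict.keys_empty])
  have hkeys : (((List.range (2 ^ m.toNat)).map
        (fun i => ((keyF m.toNat i : Int), valF lis m.toNat i))).foldl
      (fun d p => d.modify p.1 [] (fun l => l ++ [p.2])) PySem.Dict.empty).keys
      = (List.range (m.toNat + 1)).map (fun c : Nat => (c : Int)) := by
    rw [PySem.Dict.keys_foldl_modify_key _ Prod.fst [] (fun d p => fun l => l ++ [p.2])]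
    rw [List.map_map]
    have : (Prod.fst ∘ fun i => ((keyF m.toNat i : Int), valF lis m.toNat i))
        = fun i => (keyF m.toNat i : Int) := rfl
    rw [this]
    have hupd : PySem.Set.update (PySem.Dict.empty : PySem.Dict Int (List Int)).keys
        ((List.range (2 ^ m.toNat)).map (fun i => (keyF m.toNat i : Int)))
        = PySem.Set.ofList ((List.range (2 ^ m.toNat)).map (fun i => (keyF m.toNat i : Int))) := rfl
    rw [hupd, key_set]
  have hget : ∀ c : Nat, (((List.range (2 ^ m.toNat)).map
        (fun i => ((keyF m.toNat i : Int), valF lis m.toNat i))).foldl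
      (fun d p => d.modify p.1 [] (fun l => l ++ [p.2])) PySem.Dict.empty).getD (c : Int) []
      = ((List.range (2 ^ m.toNat)).filter (fun i => keyF m.toNat i == c)).map (valF lis m.toNat) := by
    intro c
    rw [PySem.Dict.getD_foldl_modify_append]
    rw [PySem.Dict.getD_empty, List.nil_append]
    rw [List.filter_map, List.map_map]
    congr 1
    apply List.filter_congr
    intro i _
    simp only [Function.comp_apply]
    exact cast_beq _ c
  rw [PySem.Dict.items_eq_map_keys _ hnodup [], hkeys, List.map_map]
  unfold canon
  apply List.map_congr_left
  intro c _
  simp only [Function.comp_apply]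
  rw [hget c]

theorem valF_map_succ (lis : List Int) (M : Nat) :
    (List.range (2 ^ (M + 1))).map (valF lis (M + 1))
    = (List.range (2 ^ M)).map (valF lis M)
      ++ ((List.range (2 ^ M)).map (valF lis M)).map (· + lis.getD M 0) := by
  rw [pow_succ, mul_two, List.range_add, List.map_append, List.map_map, List.map_map]
  congr 1
  · exact List.map_congr_left (fun i hi => valF_succ_lt (List.mem_range.1 hi))
  · exact List.map_congr_left (fun i hi => valF_succ_add (List.mem_range.1 hi))

theorem b_loop (lis : List Int) (M : Nat) :
    (List.range M).foldl
      (fun (pc : List Int × List Int) (j : Nat) =>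
        let x := PySem.List.pyGetD lis (j : Int) 0
        (pc.1 ++ pc.1.map (fun p => p + x), pc.2 ++ pc.2.map (fun c => c + 1)))
      ([0], [0])
    = ((List.range (2 ^ M)).map (valF lis M),
       (List.range (2 ^ M)).map (fun i => (keyF M i : Int))) := by
  induction M with
  | zero => simp [valF, keyF]
  | succ M ih =>
    rw [List.range_succ, List.foldl_append, ih]
    simp only [List.foldl_cons, List.foldl_nil, PySem.List.pyGetD_natCast]
    rw [Prod.mk.injEq]
    constructor
    · rw [valF_map_succ]
    · rw [keyFI_map_succ]

theorem bucket_loop (k : Nat → Nat) (v : Nat → Int) (r : List Nat) (bs : List (List Int))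
    (hk : ∀ i ∈ r, k i < bs.length) :
    (r.foldl (fun bs i => bs.set (k i) (bs.getD (k i) [] ++ [v i])) bs).length = bs.length
    ∧ ∀ c, (r.foldl (fun bs i => bs.set (k i) (bs.getD (k i) [] ++ [v i])) bs).getD c []
        = bs.getD c [] ++ ((r.filter (fun i => k i = c)).map v) := by
  induction r generalizing bs with
  | nil => simp
  | cons x t ih =>
    simp only [List.foldl_cons]
    have hx : k x < bs.length := hk x (by simp)
    have hlen : (bs.set (k x) (bs.getD (k x) [] ++ [v x])).length = bs.length := by simp
    have ht := ih (bs.set (k x) (bs.getD (k x) [] ++ [v x]))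
      (fun i hi => by rw [hlen]; exact hk i (by simp [hi]))
    refine ⟨by rw [ht.1, hlen], fun c => ?_⟩
    rw [ht.2 c, List.filter_cons]
    by_cases hc : k x = c
    · subst hc
      simp only [decide_true, if_true, List.map_cons]
      rw [List.getD_eq_getElem?_getD, List.getElem?_set_self (by exact hx)]
      simp [List.getD_eq_getElem?_getD]
    · simp only [hc, decide_false]
      rw [List.getD_eq_getElem?_getD, List.getElem?_set_ne (by omega)]
      simp [List.getD_eq_getElem?_getD]




theorem enum_map (G : Nat → List Int) (n : Nat) :
    PySem.List.enumerate ((List.range n).map G) 0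
    = (List.range n).map (fun c : Nat => ((c : Int), G c)) := by
  apply List.ext_getElem
  · simp [PySem.List.length_enumerate]
  · intro c h1 h2
    rw [PySem.List.getElem_enumerate]
    simp

theorem culc_alt_eq_canon (lis : List Int) (m : Int) : culc_alt lis m = canon lis m.toNat := by
  unfold culc_alt
  dsimp only
  rw [b_loop]
  dsimp only
  rw [List.zip_map', List.foldl_map]
  have hfun : (fun (bs : List (List Int)) (i : Nat) =>
        PySem.List.pySetD bs ((fun i => ((keyF m.toNat i : Int), valF lis m.toNat i)) i).1
          (PySem.List.pyGetD bs ((fun i => ((keyF m.toNat i : Int), valF lis m.toNat i)) i).1 []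
            ++ [((fun i => ((keyF m.toNat i : Int), valF lis m.toNat i)) i).2]))
      = (fun bs i => bs.set (keyF m.toNat i) (bs.getD (keyF m.toNat i) [] ++ [valF lis m.toNat i])) := by
    funext bs i
    simp only [PySem.List.pySetD_natCast, PySem.List.pyGetD_natCast]
  rw [hfun]
  have hbs0len : ((List.range (m.toNat + 1)).map (fun _ => ([] : List Int))).length = m.toNat + 1 := by
    simp
  have hb := bucket_loop (keyF m.toNat) (valF lis m.toNat) (List.range (2 ^ m.toNat))
    ((List.range (m.toNat + 1)).map (fun _ => ([] : List Int)))
    (fun i _ => by rw [hbs0len]; exact Nat.lt_succ_of_le (keyF_le m.toNat i))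
  have hbuckets : (List.range (2 ^ m.toNat)).foldl
      (fun bs i => bs.set (keyF m.toNat i) (bs.getD (keyF m.toNat i) [] ++ [valF lis m.toNat i]))
      ((List.range (m.toNat + 1)).map (fun _ => ([] : List Int)))
      = (List.range (m.toNat + 1)).map (fun c : Nat =>
          ((List.range (2 ^ m.toNat)).filter (fun i => keyF m.toNat i == c)).map (valF lis m.toNat)) := by
    apply List.ext_getElem
    · rw [hb.1, hbs0len]; simp
    · intro c h1 h2
      have hc : c < m.toNat + 1 := by rw [hb.1, hbs0len] at h1; exact h1
      have := hb.2 c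
      rw [List.getD_eq_getElem?_getD, List.getElem?_eq_getElem h1] at this
      simp only [Option.getD_some] at this
      rw [this]
      have hinit : ((List.range (m.toNat + 1)).map (fun _ => ([] : List Int))).getD c [] = [] := by
        rw [List.getD_eq_getElem?_getD, List.getElem?_eq_getElem (by simpa using hc)]
        simp
      rw [hinit, List.nil_append, List.getElem_map, List.getElem_range]
      congr 1
  rw [hbuckets, enum_map]
  unfold canon
  have hfresh := PySem.Dict.items_foldl_insert_fresh
    (l := (List.range (m.toNat + 1)).map (fun c : Nat =>
      ((c : Int), ((List.range (2 ^ m.toNat)).filter (fun i => keyF m.toNat i == c)).map (valF lis m.toNat))))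
    (k := Prod.fst) (v := Prod.snd) (d := PySem.Dict.empty)
    (by intro a _; simp [PySem.Dict.contains_empty])
    (by
      rw [List.map_map]
      have : (Prod.fst ∘ fun c : Nat =>
          ((c : Int), ((List.range (2 ^ m.toNat)).filter (fun i => keyF m.toNat i == c)).map (valF lis m.toNat)))
          = fun c : Nat => (c : Int) := rfl
      rw [this]
      exact List.Nodup.map (fun a b h => by exact_mod_cast h) List.nodup_range)
  unfold PySem.Dict.ofList PySem.Dict.update
  rw [hfresh]
  simp [PySem.Dict.empty]

-- ===== VERDICT (by name: the statement is the Claim_ definition above) =====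
theorem culc_spec : Claim_equal_culc := by
  intro lis m _ _
  unfold Spec_culc
  rw [culc_eq_canon, culc_alt_eq_canon]
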